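-- pv_equiv track=rewrite | github.com/eliottcassidy2000/math | 04-computation/rcone_ocf_analysis.py | make_sink_cone
-- ===== SOURCE A (Python) =====
-- def make_sink_cone(T_sub):
--     """Add a sink vertex (loses to everyone) to T_sub."""
--     n_sub = len(T_sub)
--     n = n_sub + 1
--     T = [[0] * n for _ in range(n)]
--     # Vertex 0 is sink: loses to everyone
--     for j in range(1, n):
--         T[j][0] = 1
--     for i in range(n_sub):
--         for j in range(n_sub):
--             T[i+1][j+1] = T_sub[i][j]
--     return T
-- ===== SOURCE B (Python) =====
-- def make_sink_cone(T_sub):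
--     """Add a sink vertex (loses to everyone) to T_sub."""
--     n_sub = len(T_sub)
--     # Build the result column-wise: column 0 is the sink column (0 on top,
--     # then all 1s); column j+1 is column j of T_sub with a 0 prepended
--     # (the sink's row entry). Then transpose the columns back into rows.
--     cols = [[0] + [1] * n_sub]
--     for j in range(n_sub):
--         cols.append([0] + [row[j] for row in T_sub])
--     return [[col[i] for col in cols] for i in range(n_sub + 1)]
-- ===== Notes on version B (the rewrite author's own statement) =====
-- stated objective: alternative
-- what changed: B constructs the cone column-wise — the sink column [0]+[1]*n_sub followed by each column of T_sub with a 0 prepended — and then transposes the column list back into rows, instead of A's preallocated (n+1)x(n+1) zero matrix filled in place by index-assignment loops.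
import Mathlib
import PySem

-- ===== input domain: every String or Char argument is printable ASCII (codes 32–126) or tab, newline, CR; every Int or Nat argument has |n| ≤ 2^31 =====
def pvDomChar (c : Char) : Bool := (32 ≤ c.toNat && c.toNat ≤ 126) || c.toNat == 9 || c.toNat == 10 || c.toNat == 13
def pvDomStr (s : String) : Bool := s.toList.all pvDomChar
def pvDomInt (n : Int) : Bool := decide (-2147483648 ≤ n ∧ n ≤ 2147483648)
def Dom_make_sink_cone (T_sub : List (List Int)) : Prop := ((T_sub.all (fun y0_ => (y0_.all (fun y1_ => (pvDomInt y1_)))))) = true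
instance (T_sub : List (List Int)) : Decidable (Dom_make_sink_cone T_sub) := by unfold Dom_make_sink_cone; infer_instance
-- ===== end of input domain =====

-- B builds the cone column-wise (sink column, then each T_sub column with a 0 prepended) and transposes back,
-- instead of filling a preallocated zero matrix by index loops.

-- ===== PORT A =====
-- Literal port of A. Under Pre_ every index is a valid non-negative index, so
-- List.set / List.getD are exact for Python's `T[j] = …` / `T_sub[i][j]`;
-- range(1, n) with n = n_sub+1 is List.range' 1 n_sub.
def make_sink_cone (T_sub : List (List Int)) : List (List Int) :=
  let n_sub := T_sub.length
  let n := n_sub + 1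
  let T := List.replicate n (List.replicate n (0 : Int))
  -- for j in range(1, n): T[j][0] = 1
  let T := (List.range' 1 n_sub).foldl (fun T j => T.set j ((T.getD j []).set 0 1)) T
  -- for i in range(n_sub): for j in range(n_sub): T[i+1][j+1] = T_sub[i][j]
  let T := (List.range n_sub).foldl (fun T i =>
    (List.range n_sub).foldl (fun T j =>
      T.set (i+1) ((T.getD (i+1) []).set (j+1) ((T_sub.getD i []).getD j 0))) T) T
  T

-- ===== PORT B =====
-- Literal port of Source B: cols = [[0]+[1]*n_sub] + [[0]+[row[j] for row in T_sub] for j in range(n_sub)];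
-- return [[col[i] for col in cols] for i in range(n_sub+1)]. Under Pre_ every index j is a valid
-- non-negative index into row (and i into col, whose length is always n_sub+1), so List.getD is
-- exact for Python's row[j] / col[i].
def make_sink_cone_alt (T_sub : List (List Int)) : List (List Int) :=
  let n_sub := T_sub.length
  let cols := ((0 : Int) :: List.replicate n_sub (1 : Int)) ::
    (List.range n_sub).map (fun j => (0 : Int) :: T_sub.map (fun row => row.getD j 0))
  (List.range (n_sub + 1)).map (fun i => cols.map (fun col => col.getD i 0))

-- ===== PRECONDITION & SPEC =====
-- Pre_ excludes exactly the inputs where A raises IndexError: some row shorter than len(T_sub).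
def Pre_make_sink_cone (T_sub : List (List Int)) : Prop :=
  ∀ row ∈ T_sub, T_sub.length ≤ row.length
instance (T_sub : List (List Int)) : Decidable (Pre_make_sink_cone T_sub) := by
  unfold Pre_make_sink_cone; infer_instance
def pvWitness_make_sink_cone : List (List Int) := [[0, 1], [1, 0]]

def Spec_make_sink_cone (T_sub : List (List Int)) (out : List (List Int)) : Prop :=
  out = make_sink_cone_alt T_sub
instance (T_sub : List (List Int)) (out : List (List Int)) : Decidable (Spec_make_sink_cone T_sub out) := by
  unfold Spec_make_sink_cone; infer_instance

-- ===== CLAIM (what is proved, stated in full; the proofs are below) =====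
def Claim_equal_make_sink_cone : Prop := ∀ (T_sub : List (List Int)), Dom_make_sink_cone T_sub → Pre_make_sink_cone T_sub → Spec_make_sink_cone T_sub (make_sink_cone T_sub)

-- ===== LEMMAS AND PROOFS =====

-- Repeatedly setting the SAME index p commutes with folding on the stored row.
theorem pv_setFoldFix {α : Type} (d : α) (p : ℕ) (f : ℕ → α → α) (q : ℕ) (T : List α)
    (hp : p < T.length) :
    (List.range q).foldl (fun T j => T.set p (f j (T.getD p d))) T
      = T.set p ((List.range q).foldl (fun r j => f j r) (T[p])) := by
  induction q with
  | zero => simp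
  | succ q ih =>
    rw [List.range_succ, List.foldl_append, List.foldl_append, ih]
    simp only [List.foldl_cons, List.foldl_nil]
    rw [List.getD_eq_getElem _ _ (by simpa using hp)]
    rw [List.getElem_set_self, List.set_set]

-- A fold whose i-th step rewrites row i+1 (as a function of that row): pointwise value.
theorem pv_foldSetShift {α : Type} (d : α) (n : ℕ) (h : ℕ → α → α) (f : List α → ℕ → List α)
    (hf : ∀ (T : List α) (i : ℕ), T.length = n → i + 1 < n →
      f T i = T.set (i+1) (h i (T.getD (i+1) d)))
    (q : ℕ) (hq : q < n) (T : List α) (hT : T.length = n) :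
    ((List.range q).foldl f T).length = n ∧
    ∀ k, ((List.range q).foldl f T)[k]? =
      if 1 ≤ k ∧ k ≤ q then (T[k]?).map (h (k-1)) else T[k]? := by
  induction q with
  | zero =>
    refine ⟨hT, fun k => ?_⟩
    simp only [List.range_zero, List.foldl_nil]
    rw [if_neg (by omega)]
  | succ q ih =>
    obtain ⟨hlen, hget⟩ := ih (by omega)
    rw [List.range_succ, List.foldl_append]
    simp only [List.foldl_cons, List.foldl_nil]
    rw [hf _ q hlen (by omega)]
    have hq1 : q + 1 < (List.foldl f T (List.range q)).length := by omega
    have hq1T : q + 1 < T.length := by omega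
    have hFq : (List.foldl f T (List.range q))[q+1]? = T[q+1]? := by
      rw [hget, if_neg (by omega)]
    have hgd : (List.foldl f T (List.range q)).getD (q+1) d = T[q+1]'hq1T := by
      rw [List.getD_eq_getElem?_getD, hFq, List.getElem?_eq_getElem hq1T]
      rfl
    rw [hgd]
    refine ⟨by simpa using hlen, fun k => ?_⟩
    by_cases hkq : k = q + 1
    · subst hkq
      rw [List.getElem?_set_self (by omega), if_pos (by omega),
        List.getElem?_eq_getElem hq1T]
      simp only [Option.map_some, Nat.add_sub_cancel]
    · rw [List.getElem?_set_ne (by omega), hget,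
        if_congr (show (1 ≤ k ∧ k ≤ q) ↔ (1 ≤ k ∧ k ≤ q + 1) by omega) rfl rfl]

-- Pointwise description of port A's result (under Pre_: every row has length ≥ n_sub).
theorem pv_A_getElem? (T_sub : List (List Int)) (hpre : Pre_make_sink_cone T_sub) :
    ∀ k, (make_sink_cone T_sub)[k]? =
      if k = 0 then some (List.replicate (T_sub.length + 1) (0 : Int))
      else (T_sub[k-1]?).map (fun row => 1 :: row.take T_sub.length) := by
  intro k
  have hA : make_sink_cone T_sub =
      (List.range T_sub.length).foldl (fun T i => (List.range T_sub.length).foldl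
        (fun T j => T.set (i+1) ((T.getD (i+1) []).set (j+1) ((T_sub.getD i []).getD j 0))) T)
      ((List.range T_sub.length).foldl (fun T i => T.set (1+i) ((T.getD (1+i) []).set 0 1))
        (List.replicate (T_sub.length + 1) (List.replicate (T_sub.length + 1) (0 : Int)))) := by
    simp only [make_sink_cone]
    rw [List.range'_eq_map_range, List.foldl_map]
  -- first loop (sink column)
  have h1 := pv_foldSetShift ([] : List Int) (T_sub.length + 1) (fun _ r => r.set 0 1)
      (fun T i => T.set (1+i) ((T.getD (1+i) []).set 0 1))
      (by intro T i _ _; simp [Nat.add_comm]) T_sub.length (by omega)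
      (List.replicate (T_sub.length + 1) (List.replicate (T_sub.length + 1) (0 : Int)))
      (by simp)
  obtain ⟨hF1len, hF1get⟩ := h1
  -- second loop: each step rewrites one row
  have hf2 : ∀ (T : List (List Int)) (i : ℕ), T.length = T_sub.length + 1 →
      i + 1 < T_sub.length + 1 →
      (List.range T_sub.length).foldl
        (fun T j => T.set (i+1) ((T.getD (i+1) []).set (j+1) ((T_sub.getD i []).getD j 0))) T
      = T.set (i+1) ((fun i r => (List.range T_sub.length).foldl
          (fun r j => r.set (j+1) ((T_sub.getD i []).getD j 0)) r) i (T.getD (i+1) [])) := by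
    intro T i hT hi
    rw [pv_setFoldFix ([] : List Int) (i+1)
        (fun j r => r.set (j+1) ((T_sub.getD i []).getD j 0)) T_sub.length T (by omega),
      List.getD_eq_getElem _ _ (show i + 1 < T.length by omega)]
  have h2 := pv_foldSetShift ([] : List Int) (T_sub.length + 1)
      (fun i r => (List.range T_sub.length).foldl
        (fun r j => r.set (j+1) ((T_sub.getD i []).getD j 0)) r)
      (fun T i => (List.range T_sub.length).foldl
        (fun T j => T.set (i+1) ((T.getD (i+1) []).set (j+1) ((T_sub.getD i []).getD j 0))) T)
      hf2 T_sub.length (by omega)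
      ((List.range T_sub.length).foldl (fun T i => T.set (1+i) ((T.getD (1+i) []).set 0 1))
        (List.replicate (T_sub.length + 1) (List.replicate (T_sub.length + 1) (0 : Int))))
      hF1len
  obtain ⟨hFlen, hFget⟩ := h2
  rw [hA, hFget k, hF1get k]
  by_cases hk1 : 1 ≤ k ∧ k ≤ T_sub.length
  · rw [if_pos hk1, if_pos hk1, if_neg (by omega)]
    rw [List.getElem?_replicate, if_pos (by omega)]
    have hsub : k - 1 < T_sub.length := by omega
    rw [List.getElem?_eq_getElem hsub]
    simp only [Option.map_some, Option.some.injEq]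
    -- the modified row
    have hrow0 : (List.replicate (T_sub.length + 1) (0 : Int)).set 0 1
        = 1 :: List.replicate T_sub.length (0 : Int) := by
      simp [List.replicate_succ]
    rw [hrow0]
    have hrowlen : T_sub.length ≤ (T_sub[k-1]'hsub).length :=
      hpre _ (List.getElem_mem hsub)
    have hr := pv_foldSetShift (0 : Int) (T_sub.length + 1)
        (fun j _ => (T_sub.getD (k-1) []).getD j 0)
        (fun r j => r.set (j+1) ((T_sub.getD (k-1) []).getD j 0))
        (by intro r i _ _; rfl) T_sub.length (by omega)
        (1 :: List.replicate T_sub.length (0 : Int)) (by simp)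
    obtain ⟨hrl, hrg⟩ := hr
    apply List.ext_getElem?
    intro j
    rw [hrg j]
    by_cases hj1 : 1 ≤ j ∧ j ≤ T_sub.length
    · rw [if_pos hj1]
      rw [show j = (j-1) + 1 by omega, List.getElem?_cons_succ, List.getElem?_cons_succ,
        List.getElem?_replicate, if_pos (by omega)]
      have hjr : j - 1 < ((T_sub[k-1]'hsub).take T_sub.length).length := by
        simp; omega
      rw [List.getElem?_eq_getElem hjr]
      simp only [Option.map_some, Option.some.injEq, List.getElem_take]
      rw [List.getD_eq_getElem _ _ hsub, List.getD_eq_getElem _ _ (by omega)]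
      simp
    · rw [if_neg hj1]
      rcases Nat.eq_zero_or_pos j with hj0 | hjpos
      · subst hj0; simp
      · rw [List.getElem?_eq_none (by simp; omega),
          List.getElem?_eq_none (by simp; omega)]
  · rw [if_neg hk1, if_neg hk1]
    by_cases hk0 : k = 0
    · subst hk0
      rw [if_pos rfl, List.getElem?_replicate, if_pos (by omega)]
    · rw [if_neg hk0, List.getElem?_replicate, if_neg (by omega),
        List.getElem?_eq_none (by omega)]
      rfl

-- With m ≤ row.length, rebuilding the first m entries by index equals take m.
theorem pv_map_range_getD (row : List Int) (m : ℕ) (hm : m ≤ row.length) :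
    (List.range m).map (fun j => row.getD j 0) = row.take m := by
  apply List.ext_getElem?
  intro j
  rw [List.getElem?_map]
  by_cases hj : j < m
  · rw [List.getElem?_range hj, List.getElem?_eq_getElem (l := row.take m) (by simp; omega)]
    simp only [Option.map_some, Option.some.injEq, List.getElem_take]
    exact List.getD_eq_getElem _ _ (by omega)
  · rw [List.getElem?_eq_none (l := List.range m) (by simp; omega),
      List.getElem?_eq_none (l := row.take m) (by simp; omega)]
    rfl

-- Pointwise description of port B's result (under Pre_).
theorem pv_B_getElem? (T_sub : List (List Int)) (hpre : Pre_make_sink_cone T_sub) :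
    ∀ k, (make_sink_cone_alt T_sub)[k]? =
      if k = 0 then some (List.replicate (T_sub.length + 1) (0 : Int))
      else (T_sub[k-1]?).map (fun row => 1 :: row.take T_sub.length) := by
  intro k
  simp only [make_sink_cone_alt]
  rw [List.getElem?_map]
  by_cases hk : k < T_sub.length + 1
  · rw [List.getElem?_range hk]
    simp only [Option.map_some]
    by_cases hk0 : k = 0
    · subst hk0
      rw [if_pos rfl]
      simp [List.map_map, Function.comp_def, List.map_const', List.replicate_succ]
    · rw [if_neg hk0]
      have hsub : k - 1 < T_sub.length := by omega
      rw [List.getElem?_eq_getElem hsub]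
      simp only [Option.map_some, Option.some.injEq, List.map_cons, List.map_map,
        Function.comp_def]
      have hcons : ∀ (a : Int) (l : List Int), (a :: l).getD k 0 = l.getD (k-1) 0 := by
        intro a l
        obtain ⟨k', rfl⟩ : ∃ k', k = k' + 1 := ⟨k - 1, by omega⟩
        simp
      simp only [hcons]
      rw [List.getD_replicate _ hsub]
      refine congrArg (1 :: ·) ?_
      have hstep : ∀ i, (T_sub.map (fun l => l.getD i 0)).getD (k-1) 0
          = (T_sub[k-1]'hsub).getD i 0 := by
        intro i
        rw [List.getD_eq_getElem _ _ (by simpa using hsub), List.getElem_map]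
      calc (List.range T_sub.length).map
            (fun i => (T_sub.map (fun l => l.getD i 0)).getD (k-1) 0)
          = (List.range T_sub.length).map (fun i => (T_sub[k-1]'hsub).getD i 0) :=
            List.map_congr_left (fun i _ => hstep i)
        _ = (T_sub[k-1]'hsub).take T_sub.length :=
            pv_map_range_getD _ _ (hpre _ (List.getElem_mem hsub))
  · rw [List.getElem?_eq_none (by simpa using Nat.le_of_not_lt hk)]
    rw [if_neg (by omega), List.getElem?_eq_none (by omega)]
    rfl

-- ===== VERDICT (by name: the statement is the Claim_ definition above) =====
theorem make_sink_cone_spec : Claim_equal_make_sink_cone := by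
  unfold Claim_equal_make_sink_cone
  intro T_sub _ hpre
  unfold Spec_make_sink_cone
  apply List.ext_getElem?
  intro k
  rw [pv_A_getElem? T_sub hpre k, pv_B_getElem? T_sub hpre k]
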